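-- pv_equiv track=rewrite | github.com/Alphexus/lossless-string-compression | compression.py | findRepeated
-- ===== SOURCE A (Python) =====
-- def findRepeated(string):
--   output = ""
--   for i in range(1, len(string)-1):
--     substr = string[:i]
--     if string.find(substr, i+1) != -1:
--       output = substr
--     else:
--       break
--
--   return output
-- ===== SOURCE B (Python) =====
-- def findRepeated(string):
--   lo, hi = 0, max(len(string) - 2, 0)
--   while lo < hi:
--     mid = (lo + hi + 1) // 2
--     if string[:mid] in string[mid+1:]:
--       lo = mid
--     else:
--       hi = mid - 1
--   return string[:lo]
-- ===== Notes on version B (the rewrite author's own statement) =====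
-- stated objective: faster
-- what changed: B replaces A's ascending accumulate-and-break loop (one substring search per prefix length) with a binary search on the prefix length, valid because the property that the length-i prefix re-occurs in the rest of the input is downward monotone in i.
import Mathlib
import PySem

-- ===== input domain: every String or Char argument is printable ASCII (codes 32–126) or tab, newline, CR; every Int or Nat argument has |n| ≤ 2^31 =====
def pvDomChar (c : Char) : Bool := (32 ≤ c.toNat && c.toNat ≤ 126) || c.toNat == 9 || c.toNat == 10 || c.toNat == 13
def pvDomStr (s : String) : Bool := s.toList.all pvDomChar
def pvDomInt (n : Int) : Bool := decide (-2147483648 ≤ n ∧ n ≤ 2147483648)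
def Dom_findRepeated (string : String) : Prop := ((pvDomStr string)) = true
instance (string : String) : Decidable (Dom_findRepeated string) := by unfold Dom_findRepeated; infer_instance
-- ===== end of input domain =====

-- B replaces A's ascending accumulate-and-break scan (one substring search per length) with a
-- binary search over the prefix length, valid because the repeated-prefix property is downward
-- monotone: O(log n) substring tests instead of up to n of them.


-- ===== PORT A =====
-- 'for i in range(1, len(string)-1): substr = string[:i]; if string.find(substr, i+1) != -1: output = substr else: break'
def pvALoop (s : List Char) (output : List Char) : List Int → List Char
  | [] => output
  | i :: rest =>
    let substr := PySem.List.slice s none (some i)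
    if PySem.Chars.findFrom s substr (i + 1) none ≠ -1 then
      pvALoop s substr rest
    else output

def findRepeated (string : String) : String :=
  String.ofList (pvALoop string.toList []
    (PySem.List.pyRange 1 ((string.toList.length : Int) - 1) 1))

-- ===== PORT B =====
-- midpoint bounds, cited by the termination proof of the while-loop recursion below
theorem pvMidBounds (lo hi : Int) (h : lo < hi) :
    lo + 1 ≤ PySem.Int.floordiv (lo + hi + 1) 2 ∧ PySem.Int.floordiv (lo + hi + 1) 2 ≤ hi := by
  rw [PySem.Int.floordiv_eq_ediv_of_pos (by norm_num)]
  omega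

-- 'while lo < hi: mid = (lo + hi + 1) // 2; if string[:mid] in string[mid+1:]: lo = mid else: hi = mid - 1'
def pvWhile (s : List Char) (lo hi : Int) : Int :=
  if h : lo < hi then
    let mid := PySem.Int.floordiv (lo + hi + 1) 2
    if PySem.Chars.isIn (PySem.List.slice s none (some mid)) (PySem.List.slice s (some (mid + 1)) none) then
      pvWhile s mid hi
    else
      pvWhile s lo (mid - 1)
  else lo
termination_by (hi - lo).toNat
decreasing_by
  · have := pvMidBounds lo hi h; omega
  · have := pvMidBounds lo hi h; omega

def findRepeated_alt (string : String) : String :=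
  let s := string.toList
  let lo := pvWhile s 0 (max ((s.length : Int) - 2) 0)
  String.ofList (PySem.List.slice s none (some lo))

-- ===== PRECONDITION & SPEC =====
def Spec_findRepeated (string : String) (out : String) : Prop := out = findRepeated_alt string
instance (string : String) (out : String) : Decidable (Spec_findRepeated string out) := by unfold Spec_findRepeated; infer_instance

-- ===== CLAIM (what is proved, stated in full; the proofs are below) =====
def Claim_equal_findRepeated : Prop := ∀ (string : String), Dom_findRepeated string → Spec_findRepeated string (findRepeated string)

-- ===== LEMMAS AND PROOFS =====

-- generic ascending accumulate-until-failure scan (shape of A's loop)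
def pvAsc (Q : Int → Bool) (g : Int → List Char) (out : List Char) : List Int → List Char
  | [] => out
  | i :: rest => if Q i then pvAsc Q g (g i) rest else out

-- generic binary search (shape of B's loop)
def pvBS (Q : Int → Bool) (lo hi : Int) : Int :=
  if h : lo < hi then
    let mid := PySem.Int.floordiv (lo + hi + 1) 2
    if Q mid then pvBS Q mid hi else pvBS Q lo (mid - 1)
  else lo
termination_by (hi - lo).toNat
decreasing_by
  · have := pvMidBounds lo hi h; omega
  · have := pvMidBounds lo hi h; omega

def pvQA (s : List Char) (i : Int) : Bool :=
  decide (PySem.Chars.findFrom s (PySem.List.slice s none (some i)) (i + 1) none ≠ -1)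

def pvQB (s : List Char) (i : Int) : Bool :=
  PySem.Chars.isIn (PySem.List.slice s none (some i)) (PySem.List.slice s (some (i + 1)) none)

def pvG (s : List Char) (i : Int) : List Char := PySem.List.slice s none (some i)

-- the largest k ≤ m with Q k, defaulting to 0
def pvL (Q : Int → Bool) : Nat → Nat
  | 0 => 0
  | m + 1 => if Q ((m : Int) + 1) then m + 1 else pvL Q m

lemma pvALoop_eq_asc (s : List Char) (out : List Char) (l : List Int) :
    pvALoop s out l = pvAsc (pvQA s) (pvG s) out l := by
  induction l generalizing out with
  | nil => rfl
  | cons i rest ih =>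
    simp only [pvALoop, pvAsc, pvQA, pvG, decide_eq_true_eq]
    split_ifs <;> simp [ih]

lemma pvWhile_eq_bs (s : List Char) (lo hi : Int) :
    pvWhile s lo hi = pvBS (pvQB s) lo hi := by
  rw [pvWhile, pvBS]
  split_ifs with h
  · simp only [pvQB]
    split_ifs with hq
    · have := pvMidBounds lo hi h
      exact pvWhile_eq_bs s _ hi
    · have := pvMidBounds lo hi h
      exact pvWhile_eq_bs s lo _
  · rfl
termination_by (hi - lo).toNat
decreasing_by
  · have := pvMidBounds lo hi h; omega
  · have := pvMidBounds lo hi h; omega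

lemma pvAsc_congr (Q Q' : Int → Bool) (g : Int → List Char) (l : List Int)
    (h : ∀ i ∈ l, Q i = Q' i) : ∀ out, pvAsc Q g out l = pvAsc Q' g out l := by
  induction l with
  | nil => intro out; rfl
  | cons i rest ih =>
    intro out
    simp only [pvAsc, h i (by simp)]
    split_ifs <;> [exact ih (fun j hj => h j (by simp [hj])) _; rfl]

lemma pvAsc_snoc_false (Q : Int → Bool) (g : Int → List Char) (j : Int) (hj : Q j = false)
    (l : List Int) : ∀ out, pvAsc Q g out (l ++ [j]) = pvAsc Q g out l := by
  induction l with
  | nil => intro out; simp [pvAsc, hj]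
  | cons i rest ih =>
    intro out
    simp only [List.cons_append, pvAsc]
    split_ifs <;> simp [ih]

lemma pvAsc_snoc_true (Q : Int → Bool) (g : Int → List Char) (j : Int) (hj : Q j = true)
    (l : List Int) (hl : ∀ i ∈ l, Q i = true) : ∀ out, pvAsc Q g out (l ++ [j]) = g j := by
  induction l with
  | nil => intro out; simp [pvAsc, hj]
  | cons i rest ih =>
    intro out
    simp only [List.cons_append, pvAsc, hl i (by simp)]
    simp [ih (fun j hj => hl j (by simp [hj]))]

-- a downward-monotone Q that holds at M holds everywhere in [1, M]
lemma pvAllQ (Q : Int → Bool) (M : Int)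
    (mono : ∀ i : Int, 1 ≤ i → Q (i + 1) = true → Q i = true)
    (hM : Q M = true) : ∀ i : Int, 1 ≤ i → i ≤ M → Q i = true := by
  have key : ∀ k : Nat, 1 ≤ M - k → Q (M - k) = true := by
    intro k
    induction k with
    | zero => intro _; simpa using hM
    | succ k ih =>
      intro hk
      have h1 : (1 : Int) ≤ M - k := by push_cast at hk ⊢; omega
      have := mono (M - (k + 1)) (by push_cast at hk ⊢; omega)
      have harg : M - (k + 1) + 1 = M - k := by ring
      rw [harg] at this
      exact this (ih h1)
  intro i h1 h2
  have := key (M - i).toNat (by omega)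
  rwa [show M - ((M - i).toNat : Int) = i by omega] at this

-- and one that fails at j ≥ 1 fails everywhere above j
lemma pvFalseUp (Q : Int → Bool)
    (mono : ∀ i : Int, 1 ≤ i → Q (i + 1) = true → Q i = true)
    (j : Int) (hj1 : 1 ≤ j) (hj : Q j = false) :
    ∀ i : Int, j ≤ i → Q i = false := by
  intro i hi
  by_contra hQ
  have hQt : Q i = true := by revert hQ; cases Q i <;> simp
  have := pvAllQ Q i mono hQt j hj1 hi
  simp [this] at hj

lemma pvL_le (Q : Int → Bool) (m : Nat) : pvL Q m ≤ m := by
  induction m with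
  | zero => simp [pvL]
  | succ m ih => rw [pvL]; split_ifs <;> omega

lemma pvL_sat (Q : Int → Bool) (hQ0 : Q 0 = true) (m : Nat) :
    Q ((pvL Q m : Nat) : Int) = true := by
  induction m with
  | zero => simpa [pvL] using hQ0
  | succ m ih =>
    rw [pvL]
    split_ifs with h
    · exact_mod_cast h
    · exact ih

lemma pvL_above (Q : Int → Bool) (m : Nat) :
    ∀ j : Int, ((pvL Q m : Nat) : Int) < j → j ≤ (m : Int) → Q j = false := by
  induction m with
  | zero => intro j h1 h2; omega
  | succ m ih =>
    intro j h1 h2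
    rw [pvL] at h1
    split_ifs at h1 with h
    · omega
    · rcases lt_or_ge j ((m : Int) + 1) with hlt | hge
      · exact ih j h1 (by omega)
      · have : j = (m : Int) + 1 := by push_cast at h2 ⊢; omega
        subst this
        revert h; cases Q ((m : Int) + 1) <;> simp
-- uniqueness of the characterization (no monotonicity needed)
lemma pvL_unique (Q : Int → Bool) (hQ0 : Q 0 = true) (m : Nat) (k : Int)
    (h0 : 0 ≤ k) (hk : k ≤ (m : Int)) (hQ : Q k = true)
    (habove : ∀ j : Int, k < j → j ≤ (m : Int) → Q j = false) :
    k = ((pvL Q m : Nat) : Int) := by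
  rcases lt_trichotomy k ((pvL Q m : Nat) : Int) with h | h | h
  · have := habove ((pvL Q m : Nat) : Int) h (by exact_mod_cast pvL_le Q m)
    simp [pvL_sat Q hQ0 m] at this
  · exact h
  · have := pvL_above Q m k h hk
    simp [hQ] at this

-- A's loop over [1..m] computes g (pvL Q m), for downward-monotone Q and g 0 = []
lemma pvAsc_eq_L (Q : Int → Bool) (g : Int → List Char) (hg0 : g 0 = [])
    (mono : ∀ i : Int, 1 ≤ i → Q (i + 1) = true → Q i = true) :
    ∀ m : Nat, pvAsc Q g [] (PySem.List.pyRange 1 ((m : Int) + 1) 1) =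
      g ((pvL Q m : Nat) : Int) := by
  intro m
  induction m with
  | zero =>
    rw [PySem.List.pyRange_one_eq_nil (by norm_num)]
    simp [pvAsc, pvL, hg0]
  | succ m ih =>
    have hcast : ((m + 1 : Nat) : Int) = (m : Int) + 1 := by push_cast; ring
    rw [hcast, PySem.List.pyRange_one_succ_right (by omega)]
    cases hQ : Q ((m : Int) + 1) with
    | false =>
      rw [pvAsc_snoc_false Q g _ hQ, ih]
      rw [show pvL Q (m + 1) = pvL Q m by rw [pvL]; simp [hQ]]
    | true =>
      rw [pvAsc_snoc_true Q g _ hQ _ ?_]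
      · rw [show pvL Q (m + 1) = m + 1 by rw [pvL]; simp [hQ]]
        norm_cast
      · intro i hi
        rcases PySem.List.mem_pyRange_one.mp hi with ⟨h1, h2⟩
        exact pvAllQ Q ((m : Int) + 1) mono hQ i h1 (by omega)

-- B's binary search converges to pvL Q m under the loop invariant
lemma pvBS_eq_L (Q : Int → Bool) (hQ0 : Q 0 = true)
    (mono : ∀ i : Int, 1 ≤ i → Q (i + 1) = true → Q i = true) (m : Nat) :
    ∀ n : Nat, ∀ lo hi : Int, (hi - lo).toNat ≤ n →
      0 ≤ lo → lo ≤ hi → hi ≤ (m : Int) → Q lo = true →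
      (∀ j : Int, hi < j → j ≤ (m : Int) → Q j = false) →
      pvBS Q lo hi = ((pvL Q m : Nat) : Int) := by
  intro n
  induction n with
  | zero =>
    intro lo hi hfuel h0 hlh hhm hQlo habove
    have : lo = hi := by omega
    subst this
    rw [pvBS, dif_neg (by omega)]
    exact pvL_unique Q hQ0 m lo h0 (by omega) hQlo habove
  | succ n ih =>
    intro lo hi hfuel h0 hlh hhm hQlo habove
    rw [pvBS]
    split_ifs with h
    · have hmid := pvMidBounds lo hi h
      simp only []
      split_ifs with hq
      · exact ih _ hi (by omega) (by omega) (by omega) hhm hq habove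
      · rw [Bool.not_eq_true] at hq
        refine ih lo _ (by omega) h0 (by omega) (by omega) hQlo ?_
        intro j hj1 hj2
        exact pvFalseUp Q mono _ (by omega) hq j (by omega)
    · have : lo = hi := by omega
      subst this
      exact pvL_unique Q hQ0 m lo h0 (by omega) hQlo habove

-- on indices 1 ≤ i with i + 1 ≤ len s, A's find-based test equals B's membership test
lemma pvQA_eq_pvQB (s : List Char) (i : Int) (h1 : 1 ≤ i) (h2 : i + 1 ≤ (s.length : Int)) :
    pvQA s i = pvQB s i := by
  obtain ⟨j, rfl⟩ : ∃ j : Nat, i = (j : Int) := ⟨i.toNat, by omega⟩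
  have hk : j + 1 ≤ s.length := by exact_mod_cast h2
  rw [Bool.eq_iff_iff]
  rw [pvQA, pvQB, decide_eq_true_eq]
  rw [PySem.List.slice_to_natCast s j,
      show (j : Int) + 1 = ((j + 1 : Nat) : Int) by push_cast; ring,
      PySem.List.slice_from_natCast s (j + 1)]
  rw [PySem.Chars.isIn_iff_infix]
  constructor
  · intro h
    exact not_not.mp ((PySem.Chars.findFrom_natCast_eq_neg_one_iff s _ (j + 1) hk).not.mp h)
  · intro h hfind
    exact (PySem.Chars.findFrom_natCast_eq_neg_one_iff s _ (j + 1) hk).mp hfind h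

-- B's test is downward monotone
lemma pvQB_mono (s : List Char) (i : Int) (h1 : 1 ≤ i) (h : pvQB s (i + 1) = true) :
    pvQB s i = true := by
  obtain ⟨j, rfl⟩ : ∃ j : Nat, i = (j : Int) := ⟨i.toNat, by omega⟩
  rw [pvQB, PySem.Chars.isIn_iff_infix] at h ⊢
  rw [show (j : Int) + 1 = ((j + 1 : Nat) : Int) by push_cast; ring] at h ⊢
  rw [show ((j + 1 : Nat) : Int) + 1 = ((j + 2 : Nat) : Int) by push_cast; ring] at h
  rw [PySem.List.slice_to_natCast, PySem.List.slice_from_natCast] at h ⊢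
  have hpre : s.take j <+: s.take (j + 1) := by
    have := List.take_prefix j (s.take (j + 1))
    rwa [List.take_take, min_eq_left (by omega)] at this
  have hsuf : s.drop (j + 2) <:+ s.drop (j + 1) := by
    have := List.drop_suffix 1 (s.drop (j + 1))
    simp [List.drop_drop] at this
    exact this
  exact (hpre.isInfix.trans h).trans hsuf.isInfix

-- the empty prefix always re-occurs
lemma pvQB_zero (s : List Char) : pvQB s 0 = true := by
  rw [pvQB, PySem.Chars.isIn_iff_infix,
      show (0 : Int) = ((0 : Nat) : Int) by norm_num, PySem.List.slice_to_natCast]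
  simp

lemma pvG_zero (s : List Char) : pvG s 0 = [] := by
  rw [pvG, show (0 : Int) = ((0 : Nat) : Int) by norm_num, PySem.List.slice_to_natCast]
  simp

-- ===== VERDICT (by name: the statement is the Claim_ definition above) =====
theorem findRepeated_spec : Claim_equal_findRepeated := by
  intro string _
  unfold Spec_findRepeated findRepeated findRepeated_alt
  set s := string.toList with hs
  simp only []
  congr 1
  rw [pvALoop_eq_asc, pvWhile_eq_bs]
  by_cases hn : s.length < 2
  · rw [PySem.List.pyRange_one_eq_nil (by omega)]
    have hmax : max ((s.length : Int) - 2) 0 = 0 := by omega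
    rw [hmax, pvBS, dif_neg (by omega)]
    exact (pvG_zero s).symm
  · push Not at hn
    set m : Nat := s.length - 2 with hm
    have h1 : (s.length : Int) - 1 = (m : Int) + 1 := by omega
    have h2 : max ((s.length : Int) - 2) 0 = (m : Int) := by omega
    rw [h1, h2]
    rw [pvAsc_congr (pvQA s) (pvQB s) (pvG s) _ ?_]
    · rw [pvAsc_eq_L (pvQB s) (pvG s) (pvG_zero s) (pvQB_mono s) m]
      rw [pvBS_eq_L (pvQB s) (pvQB_zero s) (pvQB_mono s) m (m : Nat) 0 (m : Int)
        (by omega) (by omega) (by omega) (by omega) (pvQB_zero s)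
        (fun j hj1 hj2 => absurd hj1 (by omega))]
      rfl
    · intro i hi
      rcases PySem.List.mem_pyRange_one.mp hi with ⟨ha, hb⟩
      exact pvQA_eq_pvQB s i ha (by omega)
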